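-- pv_equiv track=rewrite | github.com/yoosif0/algorithms_categorized | backtracking/131. Palindrome Partitioning.py | odd_palindrome_length
-- ===== SOURCE A (Python) =====
-- def odd_palindrome_length(word: str, center: int):
--     ans = 1
--     for j in range(1, min(len(word) - center, center + 1)):
--         if word[center - j] == word[center + j]:
--             ans += 2
--         else:
--             break
--     return ans
-- ===== SOURCE B (Python) =====
-- def odd_palindrome_length(word: str, center: int):
--     if center < 0 or center >= len(word):
--         return 1
--     left = word[:center][::-1]
--     right = word[center + 1:]
--     pairs = list(zip(left, right))
--     k = next((i for i, (a, b) in enumerate(pairs) if a != b), len(pairs))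
--     return 1 + 2 * k
-- ===== Notes on version B (the rewrite author's own statement) =====
-- stated objective: idiomatic
-- what changed: Replaces A's expand-around-center index-arithmetic loop with break by slicing out the reversed prefix and the suffix and returning 1 + 2 * (index of their first mismatching pair, found with enumerate/next over zip).
import Mathlib
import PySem

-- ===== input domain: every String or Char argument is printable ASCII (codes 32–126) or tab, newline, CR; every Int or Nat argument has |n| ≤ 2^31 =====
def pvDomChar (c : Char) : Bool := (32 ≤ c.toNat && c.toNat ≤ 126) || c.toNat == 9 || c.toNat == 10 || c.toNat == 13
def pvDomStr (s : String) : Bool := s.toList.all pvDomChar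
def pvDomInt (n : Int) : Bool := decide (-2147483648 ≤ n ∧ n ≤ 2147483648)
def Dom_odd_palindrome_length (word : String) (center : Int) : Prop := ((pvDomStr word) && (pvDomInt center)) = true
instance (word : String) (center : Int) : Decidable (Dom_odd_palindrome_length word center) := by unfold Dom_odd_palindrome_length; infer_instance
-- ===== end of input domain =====

-- B replaces A's index-arithmetic expand-and-break loop by slicing out the two arms
-- (prefix reversed / suffix) and measuring their common prefix; same O(n) cost, different decomposition.


-- ===== PORT A =====
-- the 'for j in range(...)' loop with break, as structural recursion over the range list
def oplLoop (cs : List Char) (center : Int) : List Int → Int → Int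
  | [], ans => ans
  | j :: rest, ans =>
      if PySem.List.pyGet? cs (center - j) = PySem.List.pyGet? cs (center + j) then
        oplLoop cs center rest (ans + 2)
      else ans

def odd_palindrome_length (word : String) (center : Int) : Int :=
  let cs := word.toList
  oplLoop cs center (PySem.List.pyRange 1 (min ((cs.length : Int) - center) (center + 1)) 1) 1

-- ===== PORT B =====
-- next((i for i, (a, b) in enumerate(pairs) if a != b), len(pairs))
def oplFirstMismatch : List (Char × Char) → Int → Int
  | [], i => i
  | (a, b) :: rest, i => if a ≠ b then i else oplFirstMismatch rest (i + 1)

def odd_palindrome_length_alt (word : String) (center : Int) : Int :=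
  let cs := word.toList
  if center < 0 ∨ (cs.length : Int) ≤ center then 1
  else
    -- word[:center][::-1] : [::-1] ported as List.reverse (PySem.List.slice?_none_none_neg_one)
    let left := (PySem.List.slice cs none (some center)).reverse
    let right := PySem.List.slice cs (some (center + 1)) none
    let pairs := left.zip right
    let k := oplFirstMismatch pairs 0
    1 + 2 * k

-- ===== PRECONDITION & SPEC =====
def Spec_odd_palindrome_length (word : String) (center : Int) (out : Int) : Prop := out = odd_palindrome_length_alt word center
instance (word : String) (center : Int) (out : Int) : Decidable (Spec_odd_palindrome_length word center out) := by unfold Spec_odd_palindrome_length; infer_instance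

-- ===== CLAIM (what is proved, stated in full; the proofs are below) =====
def Claim_equal_odd_palindrome_length : Prop := ∀ (word : String) (center : Int), Dom_odd_palindrome_length word center → Spec_odd_palindrome_length word center (odd_palindrome_length word center)

-- ===== LEMMAS AND PROOFS =====

-- length of the common agreeing prefix of two lists
def oplP : List Char → List Char → Nat
  | a :: l, b :: r => if a = b then oplP l r + 1 else 0
  | _, _ => 0

lemma oplP_nil_left (r : List Char) : oplP [] r = 0 := by cases r <;> rfl
lemma oplP_nil_right (l : List Char) : oplP l [] = 0 := by cases l <;> rfl

lemma oplFirstMismatch_zip (l : List Char) (r : List Char) (i : Int) :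
    oplFirstMismatch (l.zip r) i = i + (oplP l r : Int) := by
  induction l generalizing r i with
  | nil => simp [List.zip, oplFirstMismatch, oplP_nil_left]
  | cons a l ih =>
    cases r with
    | nil => simp [List.zip, oplFirstMismatch, oplP_nil_right]
    | cons b r =>
      simp only [List.zip_cons_cons, oplFirstMismatch, oplP]
      by_cases h : a = b
      · simp [h, ih]; ring
      · simp [h]

lemma oplLoop_eq (cs : List Char) (c : Nat) (hc : c < cs.length) :
    ∀ (fuel j : Nat) (ans : Int), 1 ≤ j → j + fuel = min (cs.length - c) (c + 1) →
      oplLoop cs (c : Int) (PySem.List.pyRange (j : Int) ((min (cs.length - c) (c + 1) : Nat) : Int) 1) ans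
        = ans + 2 * (oplP (((cs.take c).reverse).drop (j - 1)) ((cs.drop (c + 1)).drop (j - 1)) : Int) := by
  intro fuel
  induction fuel with
  | zero =>
    intro j ans hj hm
    rw [PySem.List.pyRange_one_eq_nil (by omega)]
    have hl : ((cs.take c).reverse).length = c := by
      simp [List.length_take]; omega
    have hr : (cs.drop (c + 1)).length = cs.length - (c + 1) := by simp
    have : (((cs.take c).reverse).drop (j - 1)) = [] ∨ ((cs.drop (c + 1)).drop (j - 1)) = [] := by
      by_cases h : cs.length - c ≤ c + 1
      · right; rw [List.drop_eq_nil_iff]; omega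
      · left; rw [List.drop_eq_nil_iff]; omega
    rcases this with h | h <;> simp [oplLoop, h, oplP_nil_left, oplP_nil_right]
  | succ fuel ih =>
    intro j ans hj hm
    have hjm : (j : Int) < ((min (cs.length - c) (c + 1) : Nat) : Int) := by
      have : j < min (cs.length - c) (c + 1) := by omega
      exact_mod_cast this
    rw [PySem.List.pyRange_one_cons hjm]
    have hjc : j ≤ c := by omega
    have hjr : j < cs.length - c := by omega
    have e1 : (c : Int) - (j : Int) = ((c - j : Nat) : Int) := by omega
    have e2 : (c : Int) + (j : Int) = ((c + j : Nat) : Int) := by push_cast; ring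
    have hl : ((cs.take c).reverse)[j - 1]? = cs[c - j]? := by
      rw [List.getElem?_reverse (by simp [List.length_take]; omega)]
      rw [List.getElem?_take_of_lt (by simp [List.length_take]; omega)]
      congr 1
      simp [List.length_take]; omega
    have hr : (cs.drop (c + 1))[j - 1]? = cs[c + j]? := by
      rw [List.getElem?_drop]
      congr 1
      omega
    have hlt : ((cs.take c).reverse).drop (j - 1) = cs[c - j]'(by omega) :: ((cs.take c).reverse).drop j := by
      rw [List.drop_eq_getElem_cons (by simp [List.length_take]; omega)]
      have : j - 1 + 1 = j := by omega
      rw [this]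
      congr 1
      have := hl
      rw [List.getElem?_eq_getElem (by simp [List.length_take]; omega)] at this
      rw [List.getElem?_eq_getElem (by omega)] at this
      exact (Option.some.injEq _ _).mp this
    have hrt : (cs.drop (c + 1)).drop (j - 1) = cs[c + j]'(by omega) :: (cs.drop (c + 1)).drop j := by
      rw [List.drop_eq_getElem_cons (by simp; omega)]
      have : j - 1 + 1 = j := by omega
      rw [this]
      congr 1
      have := hr
      rw [List.getElem?_eq_getElem (by simp; omega)] at this
      rw [List.getElem?_eq_getElem (by omega)] at this
      exact (Option.some.injEq _ _).mp this
    show (if PySem.List.pyGet? cs ((c : Int) - (j : Int)) = PySem.List.pyGet? cs ((c : Int) + (j : Int)) then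
        oplLoop cs (c : Int) (PySem.List.pyRange ((j : Int) + 1) _ 1) (ans + 2) else ans) = _
    rw [e1, e2, PySem.List.pyGet?_natCast, PySem.List.pyGet?_natCast]
    rw [List.getElem?_eq_getElem (l := cs) (i := c - j) (by omega),
        List.getElem?_eq_getElem (l := cs) (i := c + j) (by omega)]
    by_cases heq : cs[c - j]'(by omega) = cs[c + j]'(by omega)
    · rw [if_pos (by simp [heq])]
      have : ((j : Int) + 1) = ((j + 1 : Nat) : Int) := by push_cast; ring
      rw [this, ih (j + 1) (ans + 2) (by omega) (by omega)]
      rw [hlt, hrt]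
      simp only [oplP, if_pos heq]
      have : j + 1 - 1 = j := by omega
      rw [this]
      push_cast; ring
    · rw [if_neg (by simp [heq])]
      rw [hlt, hrt]
      simp only [oplP, if_neg heq]
      ring

-- ===== VERDICT (by name: the statement is the Claim_ definition above) =====
theorem odd_palindrome_length_spec : Claim_equal_odd_palindrome_length := by
  intro word center _
  unfold Spec_odd_palindrome_length odd_palindrome_length odd_palindrome_length_alt
  dsimp only
  set cs := word.toList with hcs
  by_cases hneg : center < 0 ∨ (cs.length : Int) ≤ center
  · rw [if_pos hneg]
    rw [PySem.List.pyRange_one_eq_nil (by omega)]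
    rfl
  · rw [if_neg hneg]
    push Not at hneg
    obtain ⟨h0, hlen⟩ := hneg
    set c : Nat := center.toNat with hc
    have hcenter : center = (c : Int) := by omega
    have hclen : c < cs.length := by omega
    have hmin : min ((cs.length : Int) - center) (center + 1) = ((min (cs.length - c) (c + 1) : Nat) : Int) := by
      rw [hcenter]; push_cast; omega
    rw [hmin, hcenter]
    have key := oplLoop_eq cs c hclen (min (cs.length - c) (c + 1) - 1) 1 1 (by omega) (by omega)
    simp only [Nat.cast_one, Nat.sub_self, List.drop_zero] at key
    rw [key]
    have e3 : ((c : Int) + 1) = ((c + 1 : Nat) : Int) := by omega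
    rw [PySem.List.slice_to_natCast, e3, PySem.List.slice_from_natCast]
    rw [oplFirstMismatch_zip]
    simp
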